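-- pv_equiv track=rewrite | github.com/shinhojung814/swjungle_algorithm | WEEK21/그리디_조이스틱.py | solution
-- ===== SOURCE A (Python) =====
-- def solution(name):
--     answer = 0
--
--     left_right = len(name)
--     next_idx = 0
--
--     for idx, char in enumerate(name):
--         answer += min(ord(char) - ord('A'), ord('Z') - ord(char) + 1)
--
--         next_idx = idx + 1
--
--         while next_idx < len(name) and name[next_idx] == 'A':
--             next_idx += 1
--
--         left_right = min(left_right, idx + idx + len(name) - next_idx)
--
--     answer += left_right
--
--     return answer
-- ===== SOURCE B (Python) =====
-- def solution(name):
--     n = len(name)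
--     # nxt[i] = smallest j >= i with name[j] != 'A', or n if none (one right-to-left pass)
--     nxt = [n] * (n + 1)
--     for i in range(n - 1, -1, -1):
--         nxt[i] = i if name[i] != 'A' else nxt[i + 1]
--     answer = 0
--     left_right = n
--     for i, c in enumerate(name):
--         o = ord(c)
--         answer += min(o - 65, 91 - o)
--         left_right = min(left_right, 2 * i + n - nxt[i + 1])
--     return answer + left_right
-- ===== Notes on version B (the rewrite author's own statement) =====
-- stated objective: alternative
-- what changed: Replaces A's per-index inner while-scan over the following run of 'A's by a next-non-A index array precomputed in one right-to-left pass, so the main loop does a constant-time lookup instead of a nested scan; worst case O(n) vs A's O(n^2), but not measurably faster on the generated inputs.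
import Mathlib
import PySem

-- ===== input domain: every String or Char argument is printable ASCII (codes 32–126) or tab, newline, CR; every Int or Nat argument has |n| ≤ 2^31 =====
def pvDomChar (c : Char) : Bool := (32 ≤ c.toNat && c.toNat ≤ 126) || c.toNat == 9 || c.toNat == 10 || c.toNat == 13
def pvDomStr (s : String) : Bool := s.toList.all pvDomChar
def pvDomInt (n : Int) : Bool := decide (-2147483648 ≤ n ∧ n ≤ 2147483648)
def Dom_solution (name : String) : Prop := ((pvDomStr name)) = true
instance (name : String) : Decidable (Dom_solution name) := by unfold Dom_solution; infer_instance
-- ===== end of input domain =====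

-- B replaces A's per-index inner while-scan by a next-non-'A' index array built in one
-- right-to-left pass, so the main loop does a lookup instead of a nested scan (objective: alternative).

-- ===== PORT A =====
-- the inner `while next_idx < len(name) and name[next_idx] == 'A': next_idx += 1`
def skipAs (cs : List Char) (j : Nat) : Nat :=
  if h : j < cs.length then
    if cs[j] = 'A' then skipAs cs (j + 1) else j
  else j
termination_by cs.length - j

def solution (name : String) : Int :=
  let cs := name.toList
  let st := cs.zipIdx.foldl
    (fun (st : Int × Int) (p : Char × Nat) =>
      let answer := st.1 + min ((p.1.toNat : Int) - 65) (90 - (p.1.toNat : Int) + 1)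
      let next_idx := skipAs cs (p.2 + 1)
      (answer, min st.2 ((p.2 : Int) + (p.2 : Int) + (cs.length : Int) - (next_idx : Int))))
    (0, (cs.length : Int))
  st.1 + st.2

-- ===== PORT B =====
-- `nxt` built right to left: entry at position i is i if cs[i] ≠ 'A', else the entry at i+1
def nxtList (cs : List Char) (i n : Nat) : List Nat :=
  match cs with
  | [] => [n]
  | c :: rest =>
    let tail := nxtList rest (i + 1) n
    (if c = 'A' then tail.headD n else i) :: tail

def solution_alt (name : String) : Int :=
  let cs := name.toList
  let n := cs.length
  let nxt := nxtList cs 0 n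
  let st := cs.zipIdx.foldl
    (fun (st : Int × Int) (p : Char × Nat) =>
      (st.1 + min ((p.1.toNat : Int) - 65) (91 - (p.1.toNat : Int)),
       min st.2 (2 * (p.2 : Int) + (n : Int) - ((nxt.getD (p.2 + 1) n : Nat) : Int))))
    (0, (n : Int))
  st.1 + st.2

-- ===== PRECONDITION & SPEC =====
def Spec_solution (name : String) (out : Int) : Prop := out = solution_alt name
instance (name : String) (out : Int) : Decidable (Spec_solution name out) := by unfold Spec_solution; infer_instance

-- ===== CLAIM (what is proved, stated in full; the proofs are below) =====
def Claim_equal_solution : Prop := ∀ (name : String), Dom_solution name → Spec_solution name (solution name)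

-- ===== LEMMAS AND PROOFS =====

-- index (within l) of the first non-'A' character, or l.length if none
def firstNonA : List Char → Nat
  | [] => 0
  | c :: r => if c = 'A' then firstNonA r + 1 else 0

theorem skipAs_eq (cs : List Char) (j : Nat) :
    skipAs cs j = j + firstNonA (cs.drop j) := by
  unfold skipAs
  split
  · rename_i h
    rw [List.drop_eq_getElem_cons h]
    by_cases hA : cs[j] = 'A'
    · simp only [hA, firstNonA]
      rw [skipAs_eq cs (j + 1)]
      simp
      omega
    · simp [hA, firstNonA]
  · rename_i h
    rw [List.drop_eq_nil_of_le (by omega)]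
    simp [firstNonA]
termination_by cs.length - j

theorem nxtList_getD (cs : List Char) (i k d : Nat) (hk : k ≤ cs.length) :
    (nxtList cs i (i + cs.length)).getD k d = i + k + firstNonA (cs.drop k) := by
  induction cs generalizing i k with
  | nil =>
    cases k with
    | zero => simp [nxtList, firstNonA]
    | succ k => simp at hk
  | cons c rest ih =>
    have hlen : i + (c :: rest).length = (i + 1) + rest.length := by simp; omega
    cases k with
    | zero =>
      simp only [nxtList, List.getD_cons_zero, List.drop_zero, firstNonA]
      by_cases hA : c = 'A'
      · rw [if_pos hA]
        have htail := ih (i + 1) 0 (Nat.zero_le _)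
        rw [hlen]
        cases hl : nxtList rest (i + 1) ((i + 1) + rest.length) with
        | nil => cases rest <;> simp [nxtList] at hl
        | cons a t =>
          rw [hl] at htail
          simp only [List.getD_cons_zero, List.drop_zero] at htail
          simp [htail, hA]
          omega
      · simp [hA]
    | succ k =>
      simp only [nxtList, List.getD_cons_succ, List.drop_succ_cons]
      rw [hlen, ih (i + 1) k (by simp at hk; omega)]
      omega

-- ===== VERDICT (by name: the statement is the Claim_ definition above) =====
theorem solution_spec : Claim_equal_solution := by
  intro name _
  unfold Spec_solution solution solution_alt
  dsimp only
  refine congrArg (fun st : Int × Int => st.1 + st.2) ?_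
  apply PySem.List.foldl_congr_mem
  intro acc p hp
  obtain ⟨c, i⟩ := p
  have hi : i < name.toList.length := by have := (List.mem_zipIdx hp).2.1; omega
  have h1 := skipAs_eq name.toList (i + 1)
  have h2 : (nxtList name.toList 0 name.toList.length).getD (i + 1) name.toList.length
      = (i + 1) + firstNonA (name.toList.drop (i + 1)) := by
    have := nxtList_getD name.toList 0 (i + 1) name.toList.length (by omega)
    simpa using this
  simp only [h1, h2, Prod.ext_iff]
  refine ⟨by omega, by push_cast; omega⟩
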